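-- pv_equiv track=rewrite | github.com/brandonlepine/bias_mi | src/data/bbq_loader.py | classify_answer_role
-- ===== SOURCE A (Python) =====
-- UNKNOWN_TAGS: set[str] = {"unknown"}
--
-- def classify_answer_role(
--     role_tag: str,
--     stereotyped_groups: list[str],
-- ) -> str:
--     """Classify an answer's role based on its answer_info role_tag and the
--     item's stereotyped_groups.
--
--     Returns one of: ``"stereotyped_target"``, ``"non_stereotyped"``,
--     ``"unknown"``.
--
--     Ported from lgbtqmi/src/data/bbq_loader.py ``_classify_answer_role``
--     with all edge-case handling preserved:
--       - GI items where stereotyped_groups contains "F"/"M" but role tags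
--         are "woman"/"man"
--       - GI items with "trans" in stereotyped_groups and tags like
--         "trans_F", "nonTrans_M"
--       - Race items with compound tags like "F-Black" (gender prefix)
--       - Multi-word groups like "African American" requiring substring
--         matching
--     """
--     tag_lower = role_tag.lower().strip()
--
--     # Unknown answer
--     if tag_lower in UNKNOWN_TAGS:
--         return "unknown"
--
--     stereo_lower = [g.lower().strip() for g in stereotyped_groups]
--
--     # GI: stereotyped_groups is ["F"] or ["M"] but tags are "woman"/"man".
--     if any(sg in ("f", "m") for sg in stereo_lower):
--         if "f" in stereo_lower and tag_lower in ("woman", "girl", "female"):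
--             return "stereotyped_target"
--         if "m" in stereo_lower and tag_lower in ("man", "boy", "male"):
--             return "stereotyped_target"
--
--     # GI: tags like "trans_F" / "nonTrans_M" with "trans" in stereotyped_groups.
--     if any("trans" in sg for sg in stereo_lower):
--         if "trans" in tag_lower and not tag_lower.startswith("nontrans"):
--             return "stereotyped_target"
--
--     # Exact match
--     if tag_lower in stereo_lower:
--         return "stereotyped_target"
--
--     # Compound tag: "F-Black", "M-Latino" — identity after the hyphen.
--     for sg in stereo_lower:
--         if "-" in tag_lower and tag_lower.split("-", 1)[1] == sg:
--             return "stereotyped_target"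
--
--     # Multi-word group matching: "African American" as tag or group.
--     # Only apply substring matching when tag or group contains a space,
--     # to avoid false positives like "old" matching "nonOld".
--     for sg in stereo_lower:
--         if " " in sg or " " in tag_lower:
--             if sg in tag_lower or tag_lower in sg:
--                 return "stereotyped_target"
--
--     # Space-stripped comparison: handles SES where role_tag is "lowSES"
--     # but stereotyped_groups is "low SES".  Strip all spaces/hyphens/
--     # underscores from both sides and compare.
--     tag_stripped = tag_lower.replace(" ", "").replace("-", "").replace("_", "")
--     for sg in stereo_lower:
--         sg_stripped = sg.replace(" ", "").replace("-", "").replace("_", "")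
--         if tag_stripped == sg_stripped:
--             return "stereotyped_target"
--
--     return "non_stereotyped"
-- ===== SOURCE B (Python) =====
-- def classify_answer_role(role_tag, stereotyped_groups):
--     """Single pass: collect list-level flags and a per-group match flag, then combine."""
--     tag = role_tag.lower().strip()
--     if tag == "unknown":
--         return "unknown"
--     tag_stripped = tag.replace(" ", "").replace("-", "").replace("_", "")
--     has_f = has_m = has_trans = is_target = False
--     for g in stereotyped_groups:
--         sg = g.lower().strip()
--         has_f = has_f or sg == "f"
--         has_m = has_m or sg == "m"
--         has_trans = has_trans or "trans" in sg
--         is_target = is_target or (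
--             sg == tag
--             or ("-" in tag and tag.split("-", 1)[1] == sg)
--             or ((" " in sg or " " in tag) and (sg in tag or tag in sg))
--             or sg.replace(" ", "").replace("-", "").replace("_", "") == tag_stripped
--         )
--     if (is_target
--             or (has_f and tag in ("woman", "girl", "female"))
--             or (has_m and tag in ("man", "boy", "male"))
--             or (has_trans and "trans" in tag and not tag.startswith("nontrans"))):
--         return "stereotyped_target"
--     return "non_stereotyped"
-- ===== Notes on version B (the rewrite author's own statement) =====
-- stated objective: alternative
-- what changed: A scans the group list six separate times (two any-guards, membership, and three for-loops); B makes a single pass collecting four boolean flags (has_f, has_m, has_trans, is_target with all per-group match predicates merged) and combines them with the tag-level tests afterwards.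
import Mathlib
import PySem

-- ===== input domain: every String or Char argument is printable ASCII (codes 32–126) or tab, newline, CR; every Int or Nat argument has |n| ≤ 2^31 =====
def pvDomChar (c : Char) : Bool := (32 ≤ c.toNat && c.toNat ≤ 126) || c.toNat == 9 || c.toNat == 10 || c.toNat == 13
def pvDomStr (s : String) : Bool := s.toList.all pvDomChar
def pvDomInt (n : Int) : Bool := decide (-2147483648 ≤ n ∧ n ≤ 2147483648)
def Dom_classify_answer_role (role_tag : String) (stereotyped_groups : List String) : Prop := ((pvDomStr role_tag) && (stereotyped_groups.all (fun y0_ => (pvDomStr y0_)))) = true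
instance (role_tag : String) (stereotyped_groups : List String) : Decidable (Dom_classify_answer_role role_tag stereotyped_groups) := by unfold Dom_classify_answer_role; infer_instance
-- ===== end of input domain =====

-- B re-decomposes A's six successive scans of the group list into one pass collecting four flags,
-- combined with the tag-level tests afterwards (objective: alternative decomposition, same cost).

-- shared sub-expressions of both Pythons (g.lower().strip(); strip spaces/hyphens/underscores;
-- the hyphen-suffix test; the space-gated substring test) — ported once, used by both ports
def pvNorm (g : String) : String := PySem.Str.strip (PySem.Str.lower g)
def pvStripSeps (s : String) : String :=
  PySem.Str.replace (PySem.Str.replace (PySem.Str.replace s " " "") "-" "") "_" ""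
-- '"-" in tag and tag.split("-", 1)[1] == sg'; List.getD is exact here: the [1] access is guarded
-- by '"-" in tag', under which split("-",1) always has two pieces
def pvHyphMatch (tag sg : String) : Bool :=
  PySem.Str.isIn "-" tag && ((((PySem.Str.splitMax? tag "-" 1).getD []).getD 1 "") == sg)
def pvSpaceMatch (tag sg : String) : Bool :=
  (PySem.Str.isIn " " sg || PySem.Str.isIn " " tag) && (PySem.Str.isIn sg tag || PySem.Str.isIn tag sg)

-- ===== PORT A ===== (each 'for sg in …: if …: return' / 'any(…)' loop is a List.any scan;
-- 'tag_lower in UNKNOWN_TAGS' with UNKNOWN_TAGS = {"unknown"} is equality with "unknown")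
def classify_answer_role (role_tag : String) (stereotyped_groups : List String) : String :=
  let tag_lower := pvNorm role_tag
  if tag_lower == "unknown" then "unknown" else
  let stereo_lower := stereotyped_groups.map pvNorm
  if stereo_lower.any (fun sg => sg == "f" || sg == "m") &&
     (stereo_lower.contains "f" && (tag_lower == "woman" || tag_lower == "girl" || tag_lower == "female")) then "stereotyped_target"
  else if stereo_lower.any (fun sg => sg == "f" || sg == "m") &&
     (stereo_lower.contains "m" && (tag_lower == "man" || tag_lower == "boy" || tag_lower == "male")) then "stereotyped_target"
  else if stereo_lower.any (fun sg => PySem.Str.isIn "trans" sg) &&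
     (PySem.Str.isIn "trans" tag_lower && !(PySem.Str.startswith tag_lower "nontrans")) then "stereotyped_target"
  else if stereo_lower.contains tag_lower then "stereotyped_target"
  else if stereo_lower.any (fun sg => pvHyphMatch tag_lower sg) then "stereotyped_target"
  else if stereo_lower.any (fun sg => pvSpaceMatch tag_lower sg) then "stereotyped_target"
  else
    let tag_stripped := pvStripSeps tag_lower
    if stereo_lower.any (fun sg => pvStripSeps sg == tag_stripped) then "stereotyped_target"
    else "non_stereotyped"

-- ===== PORT B ===== (the loop body of Source B: state = (has_f, has_m, has_trans, is_target))
def pvStep (tag tag_stripped : String) (st : Bool × Bool × Bool × Bool) (g : String) :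
    Bool × Bool × Bool × Bool :=
  let sg := pvNorm g
  (st.1 || sg == "f",
   st.2.1 || sg == "m",
   st.2.2.1 || PySem.Str.isIn "trans" sg,
   st.2.2.2 || (sg == tag || pvHyphMatch tag sg || pvSpaceMatch tag sg ||
                pvStripSeps sg == tag_stripped))

def classify_answer_role_alt (role_tag : String) (stereotyped_groups : List String) : String :=
  let tag := pvNorm role_tag
  if tag == "unknown" then "unknown" else
  let st := stereotyped_groups.foldl (pvStep tag (pvStripSeps tag)) (false, false, false, false)
  if st.2.2.2 ||
     (st.1 && (tag == "woman" || tag == "girl" || tag == "female")) ||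
     (st.2.1 && (tag == "man" || tag == "boy" || tag == "male")) ||
     (st.2.2.1 && (PySem.Str.isIn "trans" tag && !(PySem.Str.startswith tag "nontrans")))
  then "stereotyped_target" else "non_stereotyped"

-- ===== PRECONDITION & SPEC =====
def Spec_classify_answer_role (role_tag : String) (stereotyped_groups : List String) (out : String) : Prop := out = classify_answer_role_alt role_tag stereotyped_groups
instance (role_tag : String) (stereotyped_groups : List String) (out : String) : Decidable (Spec_classify_answer_role role_tag stereotyped_groups out) := by unfold Spec_classify_answer_role; infer_instance

-- ===== CLAIM (what is proved, stated in full; the proofs are below) =====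
def Claim_equal_classify_answer_role : Prop := ∀ (role_tag : String) (stereotyped_groups : List String), Dom_classify_answer_role role_tag stereotyped_groups → Spec_classify_answer_role role_tag stereotyped_groups (classify_answer_role role_tag stereotyped_groups)

-- ===== LEMMAS AND PROOFS =====

-- B's fold computes the four 'any' scans A performs separately
theorem pvStep_foldl (tag ts : String) (gs : List String) (a b c d : Bool) :
    gs.foldl (pvStep tag ts) (a, b, c, d) =
      (a || gs.any (fun g => pvNorm g == "f"),
       b || gs.any (fun g => pvNorm g == "m"),
       c || gs.any (fun g => PySem.Str.isIn "trans" (pvNorm g)),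
       d || gs.any (fun g => pvNorm g == tag || pvHyphMatch tag (pvNorm g) ||
              pvSpaceMatch tag (pvNorm g) || pvStripSeps (pvNorm g) == ts)) := by
  induction gs generalizing a b c d with
  | nil => simp
  | cons g gs ih => simp [pvStep, List.foldl_cons, ih, Bool.or_assoc]

-- A's if-chain equals B's single disjunction, as a pure Bool/if tautology
theorem pvChain (hf hm ht ex hy sp st mf mm tt : Bool) :
    (if (hf || hm) && (hf && mf) then "stereotyped_target"
     else if (hf || hm) && (hm && mm) then "stereotyped_target"
     else if ht && tt then "stereotyped_target"
     else if ex then "stereotyped_target"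
     else if hy then "stereotyped_target"
     else if sp then "stereotyped_target"
     else if st then "stereotyped_target"
     else "non_stereotyped")
    = (if (ex || hy || sp || st) || (hf && mf) || (hm && mm) || (ht && tt)
       then "stereotyped_target" else "non_stereotyped") := by
  cases hf <;> cases hm <;> cases ht <;> cases ex <;> cases hy <;> cases sp <;>
    cases st <;> cases mf <;> cases mm <;> cases tt <;> rfl

-- any distributes over || (no library lemma found by exact?/simp?)
theorem pvAny_or (l : List String) (p q : String → Bool) :
    (l.any fun x => p x || q x) = (l.any p || l.any q) := by
  induction l with
  | nil => rfl
  | cons x l ih => simp [ih]; cases p x <;> cases q x <;> simp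

-- ===== VERDICT (by name: the statement is the Claim_ definition above) =====
theorem classify_answer_role_spec : Claim_equal_classify_answer_role := by
  intro role_tag gs _
  unfold Spec_classify_answer_role classify_answer_role classify_answer_role_alt
  by_cases h : pvNorm role_tag == "unknown"
  · simp only [h, if_true]
  · simp only [h, Bool.false_eq_true, if_false, pvStep_foldl, Bool.false_or,
      ← List.any_beq', List.any_map, Function.comp_def, pvAny_or]
    exact pvChain _ _ _ _ _ _ _ _ _ _
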